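-- pv_equiv track=rewrite | github.com/yash-makwana/ipo | ipo_applicability_engine.py | is_query_applicable
-- ===== SOURCE A (Python) =====
-- from typing import Dict, List, Tuple
--
-- def is_query_applicable(query_category: str, ipo_profile: Dict[str, bool]) -> bool:
--     """Decide if query should be shown"""
--     category = query_category.lower()
--
--     # Suppress debt-related
--     if any(word in category for word in ["debenture", "convertible debt", "ncd"]):
--         return ipo_profile.get("has_convertible_debt", True)
--
--     # Suppress warrant
--     if "warrant" in category:
--         return ipo_profile.get("has_warrants", True)
--
--     # Suppress secured asset
--     if any(word in category for word in ["security", "charge", "mortgage"]):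
--         return ipo_profile.get("has_secured_instruments", True)
--
--     # Suppress SR shares
--     if any(word in category for word in ["sr equity", "superior voting"]):
--         return ipo_profile.get("has_sr_shares", True)
--
--     # Suppress VC/PE
--     if any(word in category for word in ["venture capital", "aif", "fvci"]):
--         return ipo_profile.get("has_vc_or_pe", True)
--
--     # Suppress ESOP
--     if "esop" in category or "employee stock" in category:
--         return ipo_profile.get("has_employee_equity", True)
--
--     # Default: keep query
--     return True
-- ===== SOURCE B (Python) =====
-- KEYS = [
--     "has_convertible_debt",
--     "has_warrants",
--     "has_secured_instruments",
--     "has_sr_shares",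
--     "has_vc_or_pe",
--     "has_employee_equity",
-- ]
--
-- KEYWORD_PRIO = {
--     "debenture": 0, "convertible debt": 0, "ncd": 0,
--     "warrant": 1,
--     "security": 2, "charge": 2, "mortgage": 2,
--     "sr equity": 3, "superior voting": 3,
--     "venture capital": 4, "aif": 4, "fvci": 4,
--     "esop": 5, "employee stock": 5,
-- }
--
-- def is_query_applicable(query_category: str, ipo_profile: dict) -> bool:
--     """Decide if query should be shown"""
--     category = query_category.lower()
--     best = min((prio for kw, prio in KEYWORD_PRIO.items() if kw in category),
--                default=None)
--     if best is None:
--         return True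
--     return ipo_profile.get(KEYS[best], True)
-- ===== Notes on version B (the rewrite author's own statement) =====
-- stated objective: alternative
-- what changed: Replaced A's first-match if-chain with exhaustive matching: a flat keyword-to-priority map is tested in full, the minimum matched priority (min with default) selects the profile key from an indexed key list.
import Mathlib
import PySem

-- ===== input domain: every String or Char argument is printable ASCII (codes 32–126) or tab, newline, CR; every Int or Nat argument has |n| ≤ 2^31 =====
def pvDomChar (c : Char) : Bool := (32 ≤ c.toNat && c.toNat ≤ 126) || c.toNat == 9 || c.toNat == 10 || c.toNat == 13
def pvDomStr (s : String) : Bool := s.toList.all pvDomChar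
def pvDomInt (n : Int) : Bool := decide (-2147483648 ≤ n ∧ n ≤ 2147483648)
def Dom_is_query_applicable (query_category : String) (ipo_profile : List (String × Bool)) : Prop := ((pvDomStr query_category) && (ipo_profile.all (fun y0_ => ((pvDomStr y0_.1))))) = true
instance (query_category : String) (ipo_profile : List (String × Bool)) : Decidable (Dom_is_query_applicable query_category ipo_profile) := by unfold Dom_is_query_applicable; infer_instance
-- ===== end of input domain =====

-- B replaces A's first-match if-chain by exhaustive matching: every keyword of a flat
-- keyword→priority map is tested, and the minimum matched priority selects the profile
-- key (objective: alternative — a select-minimum strategy of the same cost).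

-- ===== PORT A =====
def is_query_applicable (query_category : String) (ipo_profile : List (String × Bool)) : Bool :=
  let category := PySem.Str.lower query_category
  let d := PySem.Dict.ofList ipo_profile
  if ["debenture", "convertible debt", "ncd"].any (fun word => PySem.Str.isIn word category) then
    PySem.Dict.getD d "has_convertible_debt" true
  else if PySem.Str.isIn "warrant" category then
    PySem.Dict.getD d "has_warrants" true
  else if ["security", "charge", "mortgage"].any (fun word => PySem.Str.isIn word category) then
    PySem.Dict.getD d "has_secured_instruments" true
  else if ["sr equity", "superior voting"].any (fun word => PySem.Str.isIn word category) then
    PySem.Dict.getD d "has_sr_shares" true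
  else if ["venture capital", "aif", "fvci"].any (fun word => PySem.Str.isIn word category) then
    PySem.Dict.getD d "has_vc_or_pe" true
  else if PySem.Str.isIn "esop" category || PySem.Str.isIn "employee stock" category then
    PySem.Dict.getD d "has_employee_equity" true
  else
    true

-- ===== PORT B =====
def pvKeys : List String :=
  [ "has_convertible_debt", "has_warrants", "has_secured_instruments",
    "has_sr_shares", "has_vc_or_pe", "has_employee_equity" ]

def pvKeywordPrio : List (String × Int) :=
  [ ("debenture", 0), ("convertible debt", 0), ("ncd", 0),
    ("warrant", 1),
    ("security", 2), ("charge", 2), ("mortgage", 2),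
    ("sr equity", 3), ("superior voting", 3),
    ("venture capital", 4), ("aif", 4), ("fvci", 4),
    ("esop", 5), ("employee stock", 5) ]

def is_query_applicable_alt (query_category : String) (ipo_profile : List (String × Bool)) : Bool :=
  let category := PySem.Str.lower query_category
  let matched := (pvKeywordPrio.filter (fun kp => PySem.Str.isIn kp.1 category)).map (·.2)
  match PySem.List.min? matched (fun x => x) with
  | none => true
  | some best =>
    match PySem.List.pyGet? pvKeys best with   -- best ∈ [0,5], always in range (totality guard)
    | some key => PySem.Dict.getD (PySem.Dict.ofList ipo_profile) key true
    | none => true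

-- ===== PRECONDITION & SPEC =====
def Spec_is_query_applicable (query_category : String) (ipo_profile : List (String × Bool)) (out : Bool) : Prop := out = is_query_applicable_alt query_category ipo_profile
instance (query_category : String) (ipo_profile : List (String × Bool)) (out : Bool) : Decidable (Spec_is_query_applicable query_category ipo_profile out) := by unfold Spec_is_query_applicable; infer_instance

-- ===== CLAIM =====
def Claim_equal_is_query_applicable : Prop := ∀ (query_category : String) (ipo_profile : List (String × Bool)), Dom_is_query_applicable query_category ipo_profile → Spec_is_query_applicable query_category ipo_profile (is_query_applicable query_category ipo_profile)

-- ===== LEMMAS AND PROOFS =====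

-- proof-only group decomposition of pvKeywordPrio, and helper lemmas
def pvG0 : List (String × Int) := [("debenture", (0:Int)), ("convertible debt", 0), ("ncd", 0)]
def pvG1 : List (String × Int) := [("warrant", (1:Int))]
def pvG2 : List (String × Int) := [("security", (2:Int)), ("charge", 2), ("mortgage", 2)]
def pvG3 : List (String × Int) := [("sr equity", (3:Int)), ("superior voting", 3)]
def pvG4 : List (String × Int) := [("venture capital", (4:Int)), ("aif", 4), ("fvci", 4)]
def pvG5 : List (String × Int) := [("esop", (5:Int)), ("employee stock", 5)]

-- first extremal element of a constant-valued prefix followed by larger values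
lemma pv_min_append_const (l1 l2 : List Int) (a : Int) (hne : l1 ≠ [])
    (h1 : ∀ x ∈ l1, x = a) (h2 : ∀ x ∈ l2, a ≤ x) :
    PySem.List.min? (l1 ++ l2) (fun x => x) = some a := by
  cases h : PySem.List.min? (l1 ++ l2) (fun x => x) with
  | none =>
    rw [PySem.List.min?_eq_none_iff] at h
    rcases List.append_eq_nil_iff.mp h with ⟨h1', _⟩
    exact absurd h1' hne
  | some m =>
    have hmem := PySem.List.min?_mem h
    have hmin := PySem.List.min?_isMin h
    obtain ⟨y, hy⟩ := List.exists_mem_of_ne_nil l1 hne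
    have hma : m ≤ a := by
      have := hmin y (List.mem_append_left _ hy)
      simpa [h1 y hy] using this
    have ham : a ≤ m := by
      rcases List.mem_append.mp hmem with hm | hm
      · exact le_of_eq (h1 m hm).symm
      · exact h2 m hm
    exact congrArg some (le_antisymm hma ham)

lemma pv_snd_const (l : List (String × Int)) (P : String × Int → Bool) (a : Int)
    (h : ∀ kp ∈ l, kp.2 = a) : ∀ x ∈ (l.filter P).map (fun x => x.2), x = a := by
  intro x hx
  obtain ⟨kp, hkp, rfl⟩ := List.mem_map.mp hx
  exact h kp (List.mem_of_mem_filter hkp)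

lemma pv_snd_bound (l : List (String × Int)) (P : String × Int → Bool) (lo : Int)
    (h : ∀ kp ∈ l, lo ≤ kp.2) : ∀ x ∈ (l.filter P).map (fun x => x.2), lo ≤ x := by
  intro x hx
  obtain ⟨kp, hkp, rfl⟩ := List.mem_map.mp hx
  exact h kp (List.mem_of_mem_filter hkp)

lemma pv_min_const (l : List Int) (a : Int) (hne : l ≠ [])
    (h1 : ∀ x ∈ l, x = a) : PySem.List.min? l (fun x => x) = some a := by
  have := pv_min_append_const l [] a hne h1 (by simp)
  simpa using this

-- ===== VERDICT =====
theorem is_query_applicable_spec : Claim_equal_is_query_applicable := by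
  intro q p _
  unfold Spec_is_query_applicable is_query_applicable is_query_applicable_alt
  set c := PySem.Str.lower q with hc
  rw [show pvKeywordPrio = pvG0 ++ pvG1 ++ pvG2 ++ pvG3 ++ pvG4 ++ pvG5 from rfl]
  simp only [List.any_cons, List.any_nil, Bool.or_false, List.filter_append, List.map_append]
  by_cases h0 : (PySem.Str.isIn "debenture" c || (PySem.Str.isIn "convertible debt" c || PySem.Str.isIn "ncd" c)) = true
  ·
    simp only [List.append_assoc]
    have horig := h0
    have hne : List.map (fun x => x.2) (List.filter (fun kp => PySem.Str.isIn kp.1 c) pvG0) ≠ [] := by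
      simp only [Bool.or_eq_true] at h0
      rcases h0 with hx | hx | hx
      · exact List.ne_nil_of_mem (List.mem_map_of_mem (List.mem_filter.mpr ⟨(by simp [pvG0] : ("debenture", (0:Int)) ∈ pvG0), hx⟩))
      · exact List.ne_nil_of_mem (List.mem_map_of_mem (List.mem_filter.mpr ⟨(by simp [pvG0] : ("convertible debt", (0:Int)) ∈ pvG0), hx⟩))
      · exact List.ne_nil_of_mem (List.mem_map_of_mem (List.mem_filter.mpr ⟨(by simp [pvG0] : ("ncd", (0:Int)) ∈ pvG0), hx⟩))
    have hconst := pv_snd_const pvG0 (fun kp => PySem.Str.isIn kp.1 c) 0 (by decide)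
    have htail : ∀ x ∈ List.map (fun x => x.2) (List.filter (fun kp => PySem.Str.isIn kp.1 c) pvG1) ++ (List.map (fun x => x.2) (List.filter (fun kp => PySem.Str.isIn kp.1 c) pvG2) ++ (List.map (fun x => x.2) (List.filter (fun kp => PySem.Str.isIn kp.1 c) pvG3) ++ (List.map (fun x => x.2) (List.filter (fun kp => PySem.Str.isIn kp.1 c) pvG4) ++ List.map (fun x => x.2) (List.filter (fun kp => PySem.Str.isIn kp.1 c) pvG5)))), (0:Int) ≤ x := by
      intro x hx
      simp only [List.mem_append] at hx
      rcases hx with hm | hm | hm | hm | hm <;> exact pv_snd_bound _ _ _ (by decide) x hm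
    rw [pv_min_append_const _ _ _ hne hconst htail]
    simp only [horig, if_true]
    rfl
  by_cases h1 : PySem.Str.isIn "warrant" c = true
  ·
    simp only [Bool.or_eq_true, not_or, Bool.not_eq_true] at h0
    have e0 : List.filter (fun kp => PySem.Str.isIn kp.1 c) pvG0 = [] := by simp only [pvG0, List.filter_cons, List.filter_nil, h0, Bool.false_eq_true, if_false]
    rw [e0]
    simp only [List.map_nil, List.nil_append, List.append_assoc]
    have horig := h1
    have hne : List.map (fun x => x.2) (List.filter (fun kp => PySem.Str.isIn kp.1 c) pvG1) ≠ [] := by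
      exact List.ne_nil_of_mem (List.mem_map_of_mem (List.mem_filter.mpr ⟨(by simp [pvG1] : ("warrant", (1:Int)) ∈ pvG1), h1⟩))
    have hconst := pv_snd_const pvG1 (fun kp => PySem.Str.isIn kp.1 c) 1 (by decide)
    have htail : ∀ x ∈ List.map (fun x => x.2) (List.filter (fun kp => PySem.Str.isIn kp.1 c) pvG2) ++ (List.map (fun x => x.2) (List.filter (fun kp => PySem.Str.isIn kp.1 c) pvG3) ++ (List.map (fun x => x.2) (List.filter (fun kp => PySem.Str.isIn kp.1 c) pvG4) ++ List.map (fun x => x.2) (List.filter (fun kp => PySem.Str.isIn kp.1 c) pvG5))), (1:Int) ≤ x := by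
      intro x hx
      simp only [List.mem_append] at hx
      rcases hx with hm | hm | hm | hm <;> exact pv_snd_bound _ _ _ (by decide) x hm
    rw [pv_min_append_const _ _ _ hne hconst htail]
    simp only [horig, h0, Bool.or_self, Bool.false_eq_true, if_true, if_false]
    rfl
  by_cases h2 : (PySem.Str.isIn "security" c || (PySem.Str.isIn "charge" c || PySem.Str.isIn "mortgage" c)) = true
  ·
    simp only [Bool.or_eq_true, not_or, Bool.not_eq_true] at h0 h1
    have e0 : List.filter (fun kp => PySem.Str.isIn kp.1 c) pvG0 = [] := by simp only [pvG0, List.filter_cons, List.filter_nil, h0, Bool.false_eq_true, if_false]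
    have e1 : List.filter (fun kp => PySem.Str.isIn kp.1 c) pvG1 = [] := by simp only [pvG1, List.filter_cons, List.filter_nil, h1, Bool.false_eq_true, if_false]
    rw [e0, e1]
    simp only [List.map_nil, List.nil_append, List.append_assoc]
    have horig := h2
    have hne : List.map (fun x => x.2) (List.filter (fun kp => PySem.Str.isIn kp.1 c) pvG2) ≠ [] := by
      simp only [Bool.or_eq_true] at h2
      rcases h2 with hx | hx | hx
      · exact List.ne_nil_of_mem (List.mem_map_of_mem (List.mem_filter.mpr ⟨(by simp [pvG2] : ("security", (2:Int)) ∈ pvG2), hx⟩))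
      · exact List.ne_nil_of_mem (List.mem_map_of_mem (List.mem_filter.mpr ⟨(by simp [pvG2] : ("charge", (2:Int)) ∈ pvG2), hx⟩))
      · exact List.ne_nil_of_mem (List.mem_map_of_mem (List.mem_filter.mpr ⟨(by simp [pvG2] : ("mortgage", (2:Int)) ∈ pvG2), hx⟩))
    have hconst := pv_snd_const pvG2 (fun kp => PySem.Str.isIn kp.1 c) 2 (by decide)
    have htail : ∀ x ∈ List.map (fun x => x.2) (List.filter (fun kp => PySem.Str.isIn kp.1 c) pvG3) ++ (List.map (fun x => x.2) (List.filter (fun kp => PySem.Str.isIn kp.1 c) pvG4) ++ List.map (fun x => x.2) (List.filter (fun kp => PySem.Str.isIn kp.1 c) pvG5)), (2:Int) ≤ x := by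
      intro x hx
      simp only [List.mem_append] at hx
      rcases hx with hm | hm | hm <;> exact pv_snd_bound _ _ _ (by decide) x hm
    rw [pv_min_append_const _ _ _ hne hconst htail]
    simp only [horig, h0, h1, Bool.or_self, Bool.false_eq_true, if_true, if_false]
    rfl
  by_cases h3 : (PySem.Str.isIn "sr equity" c || PySem.Str.isIn "superior voting" c) = true
  ·
    simp only [Bool.or_eq_true, not_or, Bool.not_eq_true] at h0 h1 h2
    have e0 : List.filter (fun kp => PySem.Str.isIn kp.1 c) pvG0 = [] := by simp only [pvG0, List.filter_cons, List.filter_nil, h0, Bool.false_eq_true, if_false]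
    have e1 : List.filter (fun kp => PySem.Str.isIn kp.1 c) pvG1 = [] := by simp only [pvG1, List.filter_cons, List.filter_nil, h1, Bool.false_eq_true, if_false]
    have e2 : List.filter (fun kp => PySem.Str.isIn kp.1 c) pvG2 = [] := by simp only [pvG2, List.filter_cons, List.filter_nil, h2, Bool.false_eq_true, if_false]
    rw [e0, e1, e2]
    simp only [List.map_nil, List.nil_append, List.append_assoc]
    have horig := h3
    have hne : List.map (fun x => x.2) (List.filter (fun kp => PySem.Str.isIn kp.1 c) pvG3) ≠ [] := by
      simp only [Bool.or_eq_true] at h3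
      rcases h3 with hx | hx
      · exact List.ne_nil_of_mem (List.mem_map_of_mem (List.mem_filter.mpr ⟨(by simp [pvG3] : ("sr equity", (3:Int)) ∈ pvG3), hx⟩))
      · exact List.ne_nil_of_mem (List.mem_map_of_mem (List.mem_filter.mpr ⟨(by simp [pvG3] : ("superior voting", (3:Int)) ∈ pvG3), hx⟩))
    have hconst := pv_snd_const pvG3 (fun kp => PySem.Str.isIn kp.1 c) 3 (by decide)
    have htail : ∀ x ∈ List.map (fun x => x.2) (List.filter (fun kp => PySem.Str.isIn kp.1 c) pvG4) ++ List.map (fun x => x.2) (List.filter (fun kp => PySem.Str.isIn kp.1 c) pvG5), (3:Int) ≤ x := by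
      intro x hx
      simp only [List.mem_append] at hx
      rcases hx with hm | hm <;> exact pv_snd_bound _ _ _ (by decide) x hm
    rw [pv_min_append_const _ _ _ hne hconst htail]
    simp only [horig, h0, h1, h2, Bool.or_self, Bool.false_eq_true, if_true, if_false]
    rfl
  by_cases h4 : (PySem.Str.isIn "venture capital" c || (PySem.Str.isIn "aif" c || PySem.Str.isIn "fvci" c)) = true
  ·
    simp only [Bool.or_eq_true, not_or, Bool.not_eq_true] at h0 h1 h2 h3
    have e0 : List.filter (fun kp => PySem.Str.isIn kp.1 c) pvG0 = [] := by simp only [pvG0, List.filter_cons, List.filter_nil, h0, Bool.false_eq_true, if_false]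
    have e1 : List.filter (fun kp => PySem.Str.isIn kp.1 c) pvG1 = [] := by simp only [pvG1, List.filter_cons, List.filter_nil, h1, Bool.false_eq_true, if_false]
    have e2 : List.filter (fun kp => PySem.Str.isIn kp.1 c) pvG2 = [] := by simp only [pvG2, List.filter_cons, List.filter_nil, h2, Bool.false_eq_true, if_false]
    have e3 : List.filter (fun kp => PySem.Str.isIn kp.1 c) pvG3 = [] := by simp only [pvG3, List.filter_cons, List.filter_nil, h3, Bool.false_eq_true, if_false]
    rw [e0, e1, e2, e3]
    simp only [List.map_nil, List.nil_append]
    have horig := h4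
    have hne : List.map (fun x => x.2) (List.filter (fun kp => PySem.Str.isIn kp.1 c) pvG4) ≠ [] := by
      simp only [Bool.or_eq_true] at h4
      rcases h4 with hx | hx | hx
      · exact List.ne_nil_of_mem (List.mem_map_of_mem (List.mem_filter.mpr ⟨(by simp [pvG4] : ("venture capital", (4:Int)) ∈ pvG4), hx⟩))
      · exact List.ne_nil_of_mem (List.mem_map_of_mem (List.mem_filter.mpr ⟨(by simp [pvG4] : ("aif", (4:Int)) ∈ pvG4), hx⟩))
      · exact List.ne_nil_of_mem (List.mem_map_of_mem (List.mem_filter.mpr ⟨(by simp [pvG4] : ("fvci", (4:Int)) ∈ pvG4), hx⟩))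
    have hconst := pv_snd_const pvG4 (fun kp => PySem.Str.isIn kp.1 c) 4 (by decide)
    have htail : ∀ x ∈ List.map (fun x => x.2) (List.filter (fun kp => PySem.Str.isIn kp.1 c) pvG5), (4:Int) ≤ x := by
      intro x hx
      simp only [] at hx
      exact pv_snd_bound _ _ _ (by decide) x hx
    rw [pv_min_append_const _ _ _ hne hconst htail]
    simp only [horig, h0, h1, h2, h3, Bool.or_self, Bool.false_eq_true, if_true, if_false]
    rfl
  by_cases h5 : (PySem.Str.isIn "esop" c || PySem.Str.isIn "employee stock" c) = true
  ·
    simp only [Bool.or_eq_true, not_or, Bool.not_eq_true] at h0 h1 h2 h3 h4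
    have e0 : List.filter (fun kp => PySem.Str.isIn kp.1 c) pvG0 = [] := by simp only [pvG0, List.filter_cons, List.filter_nil, h0, Bool.false_eq_true, if_false]
    have e1 : List.filter (fun kp => PySem.Str.isIn kp.1 c) pvG1 = [] := by simp only [pvG1, List.filter_cons, List.filter_nil, h1, Bool.false_eq_true, if_false]
    have e2 : List.filter (fun kp => PySem.Str.isIn kp.1 c) pvG2 = [] := by simp only [pvG2, List.filter_cons, List.filter_nil, h2, Bool.false_eq_true, if_false]
    have e3 : List.filter (fun kp => PySem.Str.isIn kp.1 c) pvG3 = [] := by simp only [pvG3, List.filter_cons, List.filter_nil, h3, Bool.false_eq_true, if_false]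
    have e4 : List.filter (fun kp => PySem.Str.isIn kp.1 c) pvG4 = [] := by simp only [pvG4, List.filter_cons, List.filter_nil, h4, Bool.false_eq_true, if_false]
    rw [e0, e1, e2, e3, e4]
    simp only [List.map_nil, List.nil_append]
    have horig := h5
    have hne : List.map (fun x => x.2) (List.filter (fun kp => PySem.Str.isIn kp.1 c) pvG5) ≠ [] := by
      simp only [Bool.or_eq_true] at h5
      rcases h5 with hx | hx
      · exact List.ne_nil_of_mem (List.mem_map_of_mem (List.mem_filter.mpr ⟨(by simp [pvG5] : ("esop", (5:Int)) ∈ pvG5), hx⟩))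
      · exact List.ne_nil_of_mem (List.mem_map_of_mem (List.mem_filter.mpr ⟨(by simp [pvG5] : ("employee stock", (5:Int)) ∈ pvG5), hx⟩))
    have hconst := pv_snd_const pvG5 (fun kp => PySem.Str.isIn kp.1 c) 5 (by decide)
    rw [pv_min_const _ _ hne hconst]
    simp only [horig, h0, h1, h2, h3, h4, Bool.or_self, Bool.false_eq_true, if_true, if_false]
    rfl
  simp only [Bool.or_eq_true, not_or, Bool.not_eq_true] at h0 h1 h2 h3 h4 h5
  have e0 : List.filter (fun kp => PySem.Str.isIn kp.1 c) pvG0 = [] := by simp only [pvG0, List.filter_cons, List.filter_nil, h0, Bool.false_eq_true, if_false]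
  have e1 : List.filter (fun kp => PySem.Str.isIn kp.1 c) pvG1 = [] := by simp only [pvG1, List.filter_cons, List.filter_nil, h1, Bool.false_eq_true, if_false]
  have e2 : List.filter (fun kp => PySem.Str.isIn kp.1 c) pvG2 = [] := by simp only [pvG2, List.filter_cons, List.filter_nil, h2, Bool.false_eq_true, if_false]
  have e3 : List.filter (fun kp => PySem.Str.isIn kp.1 c) pvG3 = [] := by simp only [pvG3, List.filter_cons, List.filter_nil, h3, Bool.false_eq_true, if_false]
  have e4 : List.filter (fun kp => PySem.Str.isIn kp.1 c) pvG4 = [] := by simp only [pvG4, List.filter_cons, List.filter_nil, h4, Bool.false_eq_true, if_false]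
  have e5 : List.filter (fun kp => PySem.Str.isIn kp.1 c) pvG5 = [] := by simp only [pvG5, List.filter_cons, List.filter_nil, h5, Bool.false_eq_true, if_false]
  rw [e0, e1, e2, e3, e4, e5]
  simp only [h0, h1, h2, h3, h4, h5, Bool.or_self, Bool.false_eq_true, if_false, List.map_nil, List.append_nil]
  rfl
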